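-- pv_equiv track=rewrite | github.com/AtheMathmo/mli-release | scripts/train_fcnet/gen_job_array.py | generate_job_strings
-- ===== SOURCE A (Python) =====
-- import itertools
--
-- COMMAND_TEMPLATE = "python scripts/train_fcnet/train.py with "
--
-- class ConfigIterator:
--     def __init__(self, conf):
--         self.conf = conf
--
--     def __iter__(self):
--         return itertools.product(*[self.conf[key] for key in self.conf])
--
-- def generate_job_strings(config):
--     jobs = []
--     for setting in ConfigIterator(config):
--         command = COMMAND_TEMPLATE
--         for i, k in enumerate(config):
--             command += "'{}={}' ".format(k, setting[i])
--         command += "\n"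
--         jobs.append(command)
--     return jobs
-- ===== SOURCE B (Python) =====
-- COMMAND_TEMPLATE = "python scripts/train_fcnet/train.py with "
--
-- def generate_job_strings(config):
--     results = [COMMAND_TEMPLATE]
--     for k in config:
--         results = [cmd + "'{}={}' ".format(k, v) for cmd in results for v in config[k]]
--     return [cmd + "\n" for cmd in results]
-- ===== Notes on version B (the rewrite author's own statement) =====
-- stated objective: simpler
-- what changed: Drops itertools.product and the ConfigIterator class; builds the command strings incrementally, expanding every partial command by each value of the current key, so no setting tuples are materialized or indexed.
import Mathlib
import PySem

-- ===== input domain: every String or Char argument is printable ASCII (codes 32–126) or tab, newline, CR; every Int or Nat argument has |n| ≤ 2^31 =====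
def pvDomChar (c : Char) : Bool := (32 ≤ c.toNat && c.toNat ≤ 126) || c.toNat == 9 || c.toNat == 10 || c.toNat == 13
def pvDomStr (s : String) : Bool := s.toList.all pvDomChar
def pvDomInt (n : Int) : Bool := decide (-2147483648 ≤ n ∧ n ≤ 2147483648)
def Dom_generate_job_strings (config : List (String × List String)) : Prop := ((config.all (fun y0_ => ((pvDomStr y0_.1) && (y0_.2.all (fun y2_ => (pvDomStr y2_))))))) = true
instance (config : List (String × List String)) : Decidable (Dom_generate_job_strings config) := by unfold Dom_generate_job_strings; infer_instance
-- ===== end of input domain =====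

-- B drops itertools.product and the ConfigIterator class and grows partial command
-- strings key by key (a simpler decomposition; return value only, no side effects involved).

-- ===== PORT A =====
def pvCommandTemplate : String := "python scripts/train_fcnet/train.py with "

-- itertools.product(*[config[key] for key in config]) as a list, rightmost factor fastest
def pvProduct : List (List String) → List (List String)
  | [] => [[]]
  | l :: ls => l.flatMap (fun x => (pvProduct ls).map (fun t => x :: t))

def generate_job_strings (config : List (String × List String)) : List String :=
  (pvProduct (config.map (fun kv => kv.2))).foldl
    (fun jobs setting =>
      jobs ++ [((PySem.List.enumerate config 0).foldl
          (fun command ik =>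
            command ++ "'" ++ ik.2.1 ++ "=" ++ PySem.List.pyGetD setting ik.1 "" ++ "' ")
          pvCommandTemplate) ++ "\n"])
    []

-- ===== PORT B =====
def generate_job_strings_alt (config : List (String × List String)) : List String :=
  (config.foldl
      (fun results kv =>
        results.flatMap (fun cmd =>
          kv.2.map (fun v => cmd ++ "'" ++ kv.1 ++ "=" ++ v ++ "' ")))
      [pvCommandTemplate]).map (fun cmd => cmd ++ "\n")

-- ===== PRECONDITION & SPEC =====
def Spec_generate_job_strings (config : List (String × List String)) (out : List String) : Prop := out = generate_job_strings_alt config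
instance (config : List (String × List String)) (out : List String) : Decidable (Spec_generate_job_strings config out) := by unfold Spec_generate_job_strings; infer_instance

-- ===== CLAIM (what is proved, stated in full; the proofs are below) =====
def Claim_equal_generate_job_strings : Prop := ∀ (config : List (String × List String)), Dom_generate_job_strings config → Spec_generate_job_strings config (generate_job_strings config)

-- ===== LEMMAS AND PROOFS =====

-- the "'k=v' " segments for a setting tuple, zipped with the keys
def pvZipBuild : List (String × List String) → List String → String
  | (k, _) :: cs, v :: vs => "'" ++ k ++ "=" ++ v ++ "' " ++ pvZipBuild cs vs
  | _, _ => ""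

theorem pvProduct_length {ls : List (List String)} {s : List String}
    (h : s ∈ pvProduct ls) : s.length = ls.length := by
  induction ls generalizing s with
  | nil => simp [pvProduct] at h; simp [h]
  | cons l ls ih =>
    simp [pvProduct] at h
    obtain ⟨x, _, t, ht, rfl⟩ := h
    simp [ih ht]

theorem pvInner_eq (config : List (String × List String)) :
    ∀ (p r : List String) (cmd : String), config.length ≤ r.length →
    (PySem.List.enumerate config (p.length : Int)).foldl
        (fun command ik =>
          command ++ "'" ++ ik.2.1 ++ "=" ++ PySem.List.pyGetD (p ++ r) ik.1 "" ++ "' ")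
        cmd
      = cmd ++ pvZipBuild config r := by
  induction config with
  | nil => intro p r cmd _; simp [PySem.List.enumerate_nil, pvZipBuild]
  | cons kv cs ih =>
    intro p r cmd hlen
    obtain ⟨k, vs⟩ := kv
    cases r with
    | nil => simp at hlen
    | cons v r' =>
      rw [PySem.List.enumerate_cons]
      simp only [List.foldl_cons]
      have hget : PySem.List.pyGetD (p ++ v :: r') ((p.length : Int)) "" = v := by
        rw [PySem.List.pyGetD_natCast]
        simp [List.getD]
      rw [hget]
      have h1 : ((p.length : Int) + 1) = ((p ++ [v]).length : Int) := by simp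
      have h2 : p ++ v :: r' = (p ++ [v]) ++ r' := by simp
      rw [h1, h2, ih (p ++ [v]) r' _ (by simpa using hlen)]
      simp [pvZipBuild, String.append_assoc]

theorem pvExpand_eq (config : List (String × List String)) :
    ∀ (R : List String),
    config.foldl
        (fun results kv =>
          results.flatMap (fun cmd =>
            kv.2.map (fun v => cmd ++ "'" ++ kv.1 ++ "=" ++ v ++ "' ")))
        R
      = R.flatMap (fun cmd =>
          (pvProduct (config.map (fun kv => kv.2))).map (fun s => cmd ++ pvZipBuild config s)) := by
  induction config with
  | nil =>
    intro R
    simp [pvProduct, pvZipBuild, List.flatMap_singleton']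
  | cons kv cs ih =>
    intro R
    obtain ⟨k, vs⟩ := kv
    simp only [List.foldl_cons, ih]
    rw [List.flatMap_assoc]
    apply List.flatMap_congr
    intro cmd _
    simp only [pvProduct, List.map_cons, List.flatMap_map, List.map_flatMap, List.map_map,
      List.flatMap_map]
    apply List.flatMap_congr
    intro v _
    apply List.map_congr_left
    intro s _
    simp [pvZipBuild, String.append_assoc]

-- ===== VERDICT (by name: the statement is the Claim_ definition above) =====
theorem generate_job_strings_spec : Claim_equal_generate_job_strings := by
  intro config _
  unfold Spec_generate_job_strings generate_job_strings generate_job_strings_alt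
  rw [PySem.List.foldl_append_singleton_eq_map, pvExpand_eq]
  simp only [List.flatMap_cons, List.flatMap_nil, List.append_nil, List.nil_append, List.map_map]
  apply List.map_congr_left
  intro s hs
  have hlen : config.length ≤ s.length := by
    rw [pvProduct_length hs]; simp
  have := pvInner_eq config [] s pvCommandTemplate hlen
  simp only [List.length_nil, Nat.cast_zero, List.nil_append] at this
  simp [this]
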